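-- pv_equiv track=rewrite | github.com/thisisnish/cs50ai | search/tictactoe/tictactoe.py | is_horizontal_win
-- ===== SOURCE A (Python) =====
-- X = "X"
--
-- O = "O"
--
-- ROWS = 3
--
-- COLS = 3
--
-- def is_horizontal_win(board):
--         for i in range(ROWS):
--             for player in [X, O]:
--                 count = 0
--                 for j in range(COLS):
--                     if board[i][j] == player:
--                         count += 1
--                     if count == 3:
--                         return player
--         return None
-- ===== SOURCE B (Python) =====
-- X = "X"
-- O = "O"
-- ROWS = 3
-- COLS = 3
--
-- def is_horizontal_win(board):
--     for i in range(ROWS):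
--         a, b, c = board[i][0], board[i][1], board[i][2]
--         if a == b == c and a in (X, O):
--             return a
--     return None
-- ===== Notes on version B (the rewrite author's own statement) =====
-- stated objective: simpler
-- what changed: Replaces the per-player count-to-3 inner loops with a single direct chained-equality test on the three cells of each row.
-- outside the precondition, e.g. on is_horizontal_win([['X', 'X', 'X']]): A returns 'X', B returns 'X'
import Mathlib
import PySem

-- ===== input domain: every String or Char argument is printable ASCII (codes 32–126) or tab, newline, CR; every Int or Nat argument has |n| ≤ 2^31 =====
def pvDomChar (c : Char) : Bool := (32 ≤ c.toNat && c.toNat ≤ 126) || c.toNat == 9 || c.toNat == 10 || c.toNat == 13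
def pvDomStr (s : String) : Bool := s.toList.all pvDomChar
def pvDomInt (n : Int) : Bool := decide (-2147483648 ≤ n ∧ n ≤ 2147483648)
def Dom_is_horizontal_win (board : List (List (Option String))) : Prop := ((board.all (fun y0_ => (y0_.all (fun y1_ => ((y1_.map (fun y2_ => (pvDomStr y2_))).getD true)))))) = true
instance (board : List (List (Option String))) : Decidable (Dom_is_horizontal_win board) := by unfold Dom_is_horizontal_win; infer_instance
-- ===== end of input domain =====

-- B replaces A's per-player count-to-3 inner loops by one chained-equality test on the
-- three cells of each row (objective: simpler).

-- ===== PORT A =====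
-- board[i][j]; under Pre_ the indices are always in range, so the getD defaults are never taken.
def pvCellA (board : List (List (Option String))) (i j : Int) : Option String :=
  (PySem.List.pyGet? ((PySem.List.pyGet? board i).getD []) j).getD none

-- the inner 'for j in range(COLS)' counting loop; since count can only reach 3 on the
-- final step, count == 3 at loop end iff Python's early return fired.
def pvCountA (board : List (List (Option String))) (i : Int) (player : String) : Nat :=
  (PySem.List.pyRange 0 3 1).foldl
    (fun count j => if pvCellA board i j = some player then count + 1 else count) 0

def is_horizontal_win (board : List (List (Option String))) : Option String :=
  (PySem.List.pyRange 0 3 1).foldl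
    (fun acc i =>
      match acc with
      | some p => some p
      | none =>
        ["X", "O"].foldl
          (fun acc2 player =>
            match acc2 with
            | some p => some p
            | none => if pvCountA board i player = 3 then some player else none)
          none)
    none

-- ===== PORT B =====
-- 'for i in range(ROWS): a, b, c = board[i][0], board[i][1], board[i][2];
--  if a == b == c and a in (X, O): return a' — early return via structural recursion.
def pvAltLoop (board : List (List (Option String))) : List Int → Option String
  | [] => none
  | i :: rest =>
    let row := (PySem.List.pyGet? board i).getD []
    let a := (PySem.List.pyGet? row 0).getD none
    let b := (PySem.List.pyGet? row 1).getD none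
    let c := (PySem.List.pyGet? row 2).getD none
    if a = b ∧ b = c ∧ (a = some "X" ∨ a = some "O") then a
    else pvAltLoop board rest

def is_horizontal_win_alt (board : List (List (Option String))) : Option String :=
  pvAltLoop board (PySem.List.pyRange 0 3 1)

-- ===== PRECONDITION & SPEC =====
-- A indexes board[0..2][0..2]: it raises IndexError on boards with fewer than 3 rows or
-- with a short row among the first three — except when an earlier complete row already
-- wins, where A returns before reaching the short part; this shape condition also
-- excludes those rare returning inputs (B returns the same value there; see claim.json cites).
def Pre_is_horizontal_win (board : List (List (Option String))) : Prop :=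
  3 ≤ board.length ∧ ∀ row ∈ board.take 3, 3 ≤ row.length
instance (board : List (List (Option String))) : Decidable (Pre_is_horizontal_win board) := by
  unfold Pre_is_horizontal_win; infer_instance

def pvWitness_is_horizontal_win : List (List (Option String)) :=
  [[some "X", some "O", none], [none, none, none], [some "O", some "O", some "O"]]

def Spec_is_horizontal_win (board : List (List (Option String))) (out : Option String) : Prop := out = is_horizontal_win_alt board
instance (board : List (List (Option String))) (out : Option String) : Decidable (Spec_is_horizontal_win board out) := by unfold Spec_is_horizontal_win; infer_instance

-- ===== CLAIM (what is proved, stated in full; the proofs are below) =====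
def Claim_equal_is_horizontal_win : Prop := ∀ (board : List (List (Option String))), Dom_is_horizontal_win board → Pre_is_horizontal_win board → Spec_is_horizontal_win board (is_horizontal_win board)

-- ===== LEMMAS AND PROOFS =====

lemma pg0 {α : Type} (d x : α) (xs : List α) : (PySem.List.pyGet? (x::xs) (0:Int)).getD d = x := by
  rw [show (0:Int) = ((0:Nat):Int) by norm_cast, PySem.List.pyGet?_natCast]; simp
lemma pg1 {α : Type} (d x y : α) (xs : List α) : (PySem.List.pyGet? (x::y::xs) (1:Int)).getD d = y := by
  rw [show (1:Int) = ((1:Nat):Int) by norm_cast, PySem.List.pyGet?_natCast]; simp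
lemma pg2 {α : Type} (d x y z : α) (xs : List α) : (PySem.List.pyGet? (x::y::z::xs) (2:Int)).getD d = z := by
  rw [show (2:Int) = ((2:Nat):Int) by norm_cast, PySem.List.pyGet?_natCast]; simp

-- the inner counting loop written out as three nested increments
lemma cnt_shape (board : List (List (Option String))) (i : Int) (p : String) :
    pvCountA board i p =
      (if pvCellA board i 2 = some p then
        (if pvCellA board i 1 = some p then
          (if pvCellA board i 0 = some p then (0:Nat)+1 else 0)+1
         else (if pvCellA board i 0 = some p then (0:Nat)+1 else 0))+1
       else (if pvCellA board i 1 = some p then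
          (if pvCellA board i 0 = some p then (0:Nat)+1 else 0)+1
         else (if pvCellA board i 0 = some p then (0:Nat)+1 else 0))) := by
  have hr : PySem.List.pyRange 0 3 1 = [0, 1, 2] := by decide
  simp only [pvCountA, hr, List.foldl]

-- the count reaches 3 exactly when all three cells hold the player
lemma cnt_iff (board : List (List (Option String))) (i : Int) (p : String) :
    (pvCountA board i p = 3) ↔
      (pvCellA board i 0 = some p ∧ pvCellA board i 1 = some p ∧ pvCellA board i 2 = some p) := by
  rw [cnt_shape]; split_ifs <;> simp_all

-- if the chained-equality test fails, no player occupies the whole row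
lemma notRow (x y z : Option String) (p : String) (h : ¬(x = y ∧ y = z ∧ (x = some "X" ∨ x = some "O")))
    (hp : p = "X" ∨ p = "O") : ¬(x = some p ∧ y = some p ∧ z = some p) := by
  rintro ⟨hx, hy, hz⟩
  refine h ⟨hx.trans hy.symm, hy.trans hz.symm, ?_⟩
  rcases hp with rfl | rfl
  · exact Or.inl hx
  · exact Or.inr hx

lemma main_eq (x0 y0 z0 x1 y1 z1 x2 y2 z2 : Option String)
    (u0 u1 u2 : List (Option String)) (t : List (List (Option String))) :
    is_horizontal_win ((x0::y0::z0::u0)::(x1::y1::z1::u1)::(x2::y2::z2::u2)::t)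
      = is_horizontal_win_alt ((x0::y0::z0::u0)::(x1::y1::z1::u1)::(x2::y2::z2::u2)::t) := by
  have hr : PySem.List.pyRange 0 3 1 = [0, 1, 2] := by decide
  unfold is_horizontal_win is_horizontal_win_alt
  rw [hr]
  simp only [List.foldl, cnt_iff, pvCellA, pg0, pg1, pg2, pvAltLoop]
  by_cases h0 : (x0 = y0 ∧ y0 = z0 ∧ (x0 = some "X" ∨ x0 = some "O"))
  · obtain ⟨e1, e2, hx⟩ := h0
    subst e1; subst e2
    rcases hx with hx | hx <;> subst hx <;> simp
  · simp only [if_neg h0, if_neg (notRow _ _ _ _ h0 (Or.inl rfl)),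
      if_neg (notRow _ _ _ _ h0 (Or.inr rfl))]
    by_cases h1 : (x1 = y1 ∧ y1 = z1 ∧ (x1 = some "X" ∨ x1 = some "O"))
    · obtain ⟨e1, e2, hx⟩ := h1
      subst e1; subst e2
      rcases hx with hx | hx <;> subst hx <;> simp
    · simp only [if_neg h1, if_neg (notRow _ _ _ _ h1 (Or.inl rfl)),
        if_neg (notRow _ _ _ _ h1 (Or.inr rfl))]
      by_cases h2 : (x2 = y2 ∧ y2 = z2 ∧ (x2 = some "X" ∨ x2 = some "O"))
      · obtain ⟨e1, e2, hx⟩ := h2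
        subst e1; subst e2
        rcases hx with hx | hx <;> subst hx <;> simp
      · simp only [if_neg h2, if_neg (notRow _ _ _ _ h2 (Or.inl rfl)),
          if_neg (notRow _ _ _ _ h2 (Or.inr rfl))]

-- ===== VERDICT (by name: the statement is the Claim_ definition above) =====
theorem is_horizontal_win_spec : Claim_equal_is_horizontal_win := by
  intro board _ hpre
  obtain ⟨hlen, hrows⟩ := hpre
  match board, hlen with
  | r0 :: r1 :: r2 :: t, _ =>
    have h0 : 3 ≤ r0.length := hrows r0 (by simp [List.take])
    have h1 : 3 ≤ r1.length := hrows r1 (by simp [List.take])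
    have h2 : 3 ≤ r2.length := hrows r2 (by simp [List.take])
    match r0, h0 with
    | x0 :: y0 :: z0 :: u0, _ =>
    match r1, h1 with
    | x1 :: y1 :: z1 :: u1, _ =>
    match r2, h2 with
    | x2 :: y2 :: z2 :: u2, _ =>
      exact main_eq x0 y0 z0 x1 y1 z1 x2 y2 z2 u0 u1 u2 t
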